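-- pv_equiv track=rewrite | github.com/diffidentgabion/QGIS-FDP-par-Commune-Automation | sirene_buildings.py | _category_index
-- ===== SOURCE A (Python) =====
-- SIRENE_CATEGORIES = [
--     {"label": "Commerce",                              "color": "#F4A261", "naf_ranges": [(45, 47)]},
--     {"label": "Restauration & hébergement",            "color": "#E63946", "naf_ranges": [(55, 56)]},
--     {"label": "Santé & action sociale",                "color": "#06D6A0", "naf_ranges": [(86, 88)]},
--     {
--         "label": "Éducation",
--         "color": "#FFD166",
--         "naf_ranges": [(85, 85)],
--         # Exclure les codes Formation qui seraient sinon capturés par div=85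
--         "naf_exclude_suffixes": ["51Z", "52Z", "53Z", "59A", "59B", "60Z"],
--     },
--     {
--         "label": "Formation",
--         "color": "#B8A000",
--         "naf_ranges": [],
--         # Activités de formation continue, artistique, etc. dans la division 85
--         "naf_exact_codes": [
--             "85.51Z", "85.52Z", "85.53Z",
--             "85.59A", "85.59B", "85.60Z",
--         ],
--     },
--     {"label": "Équipements & services publics",        "color": "#C1121F", "naf_ranges": [(84, 84)]},
--     {"label": "Culture, sport & loisirs",              "color": "#118AB2", "naf_ranges": [(90, 93)]},
--     {"label": "Services aux personnes & associations", "color": "#F48FB1", "naf_ranges": [(94, 96)]},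
--     {"label": "Bureaux & services tertiaires",         "color": "#7B2D8B", "naf_ranges": [(58, 66), (68, 75), (77, 82)]},
--     {"label": "Industrie, artisanat & construction",   "color": "#8B5E3C", "naf_ranges": [(5, 9), (10, 43)]},
--     {"label": "Transport & logistique",                "color": "#6C757D", "naf_ranges": [(49, 53)]},
--     {"label": "Agriculture, sylviculture & pêche",     "color": "#2D6A4F", "naf_ranges": [(1, 3)]},
--     {"label": "Activité non classée",                  "color": "#BBBBBB", "naf_ranges": []},
-- ]
--
-- _CATCHALL_IDX   = len(SIRENE_CATEGORIES) - 1
--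
-- def _naf_division(naf_code: str):
--     """
--     Extrait la division NAF (2 premiers caractères du code SIRENE).
--     Ex. : "47.11Z" → 47.  Retourne None si le code est absent ou malformé.
--     """
--     if not naf_code or len(naf_code) < 2:
--         return None
--     try:
--         return int(naf_code[:2])
--     except ValueError:
--         return None
--
-- def _category_index(naf_code: str) -> int:
--     """
--     Retourne l'index dans SIRENE_CATEGORIES pour le code NAF complet.
--
--     Deux passes :
--       1. Codes exacts (naf_exact_codes) — capturent la Formation avant Éducation.
--       2. Plages de divisions (naf_ranges) avec exclusions (naf_exclude_suffixes).
--
--     Si aucune correspondance, retourne _CATCHALL_IDX.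
--     """
--     naf_clean = (naf_code or "").strip()
--     naf_div   = _naf_division(naf_clean)
--
--     # Passe 1 — codes exacts (ex. Formation)
--     for idx, cat in enumerate(SIRENE_CATEGORIES[:-1]):
--         exact = cat.get("naf_exact_codes")
--         if exact and naf_clean in exact:
--             return idx
--
--     # Passe 2 — plages de divisions avec exclusions optionnelles (ex. Éducation)
--     if naf_div is not None:
--         for idx, cat in enumerate(SIRENE_CATEGORIES[:-1]):
--             for lo, hi in cat.get("naf_ranges", []):
--                 if lo <= naf_div <= hi:
--                     excludes = cat.get("naf_exclude_suffixes", ())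
--                     if any(naf_clean.endswith(suf) for suf in excludes):
--                         break   # exclu de cette catégorie, passer à la suivante
--                     return idx
--
--     return _CATCHALL_IDX
-- ===== SOURCE B (Python) =====
-- """Same mapping as A, but via precomputed lookup tables instead of nested range scans."""
--
-- _CATCHALL_IDX = 12
--
-- # exact NAF codes -> category index (Formation)
-- _EXACT_IDX = {
--     "85.51Z": 4, "85.52Z": 4, "85.53Z": 4,
--     "85.59A": 4, "85.59B": 4, "85.60Z": 4,
-- }
--
-- # NAF division -> category index (every (lo, hi) range expanded once)
-- _DIV_IDX = {
--     45: 0, 46: 0, 47: 0, 55: 1, 56: 1, 86: 2, 87: 2, 88: 2, 85: 3, 84: 5,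
--     90: 6, 91: 6, 92: 6, 93: 6, 94: 7, 95: 7, 96: 7, 58: 8, 59: 8, 60: 8,
--     61: 8, 62: 8, 63: 8, 64: 8, 65: 8, 66: 8, 68: 8, 69: 8, 70: 8, 71: 8,
--     72: 8, 73: 8, 74: 8, 75: 8, 77: 8, 78: 8, 79: 8, 80: 8, 81: 8, 82: 8,
--     5: 9, 6: 9, 7: 9, 8: 9, 9: 9, 10: 9, 11: 9, 12: 9, 13: 9, 14: 9,
--     15: 9, 16: 9, 17: 9, 18: 9, 19: 9, 20: 9, 21: 9, 22: 9, 23: 9, 24: 9,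
--     25: 9, 26: 9, 27: 9, 28: 9, 29: 9, 30: 9, 31: 9, 32: 9, 33: 9, 34: 9,
--     35: 9, 36: 9, 37: 9, 38: 9, 39: 9, 40: 9, 41: 9, 42: 9, 43: 9, 49: 10,
--     50: 10, 51: 10, 52: 10, 53: 10, 1: 11, 2: 11, 3: 11,
-- }
--
-- # divisions whose category carries exclude-suffixes (Education)
-- _EXCL_SUFFIXES = {
--     85: ["51Z", "52Z", "53Z", "59A", "59B", "60Z"],
-- }
--
--
-- def _category_index(naf_code: str) -> int:
--     naf_clean = (naf_code or "").strip()
--     hit = _EXACT_IDX.get(naf_clean)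
--     if hit is not None:
--         return hit
--     if len(naf_clean) < 2:
--         return _CATCHALL_IDX
--     try:
--         div = int(naf_clean[:2])
--     except ValueError:
--         return _CATCHALL_IDX
--     if any(naf_clean.endswith(suf) for suf in _EXCL_SUFFIXES.get(div, [])):
--         return _CATCHALL_IDX
--     return _DIV_IDX.get(div, _CATCHALL_IDX)
-- ===== Notes on version B (the rewrite author's own statement) =====
-- stated objective: alternative
-- what changed: A scans the category table twice per call (an exact-code pass, then a nested ranges-with-exclusions pass); B precomputes three lookup tables once (exact code -> index, each NAF division expanded from the (lo,hi) ranges -> index, division -> exclude-suffixes) and answers with two dict lookups plus one suffix check.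
import Mathlib
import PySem

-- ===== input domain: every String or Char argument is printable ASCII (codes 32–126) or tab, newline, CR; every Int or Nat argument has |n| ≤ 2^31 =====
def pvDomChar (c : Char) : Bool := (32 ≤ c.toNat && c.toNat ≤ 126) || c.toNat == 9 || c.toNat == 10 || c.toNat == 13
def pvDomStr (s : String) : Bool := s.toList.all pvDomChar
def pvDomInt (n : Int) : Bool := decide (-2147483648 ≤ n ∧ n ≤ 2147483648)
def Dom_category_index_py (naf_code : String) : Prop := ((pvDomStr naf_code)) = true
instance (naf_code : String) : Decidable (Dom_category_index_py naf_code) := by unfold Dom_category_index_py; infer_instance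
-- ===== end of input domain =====

-- B replaces A's two enumerate-and-scan passes over the category table by precomputed lookup
-- tables (exact-code dict, expanded per-division dict, exclude-suffix dict); objective: alternative (dict dispatch instead of table scans; no speedup claimed).

-- ===== PORT A =====
-- each category, label/color dropped (unused): (naf_exact_codes, naf_ranges, naf_exclude_suffixes)
def pvCats : List (List (List Char) × List (Int × Int) × List (List Char)) :=
  [ ([], [((45 : Int), (47 : Int))], []),
    ([], [(55, 56)], []),
    ([], [(86, 88)], []),
    ([], [(85, 85)], ["51Z".toList, "52Z".toList, "53Z".toList, "59A".toList, "59B".toList, "60Z".toList]),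
    (["85.51Z".toList, "85.52Z".toList, "85.53Z".toList, "85.59A".toList, "85.59B".toList, "85.60Z".toList], [], []),
    ([], [(84, 84)], []),
    ([], [(90, 93)], []),
    ([], [(94, 96)], []),
    ([], [(58, 66), (68, 75), (77, 82)], []),
    ([], [(5, 9), (10, 43)], []),
    ([], [(49, 53)], []),
    ([], [(1, 3)], []) ]   -- = SIRENE_CATEGORIES[:-1]; the catch-all index is 12

def pvNafDivision (naf_code : List Char) : Option Int :=
  if naf_code = [] ∨ naf_code.length < 2 then none
  else PySem.Int.ofChars? (PySem.Chars.slice naf_code none (some 2))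

-- pass 1: 'for idx, cat in enumerate(...): if exact and naf_clean in exact: return idx'
def pvPass1 (s : List Char) : List (Int × (List (List Char) × List (Int × Int) × List (List Char))) → Option Int
  | [] => none
  | (idx, cat) :: rest => if cat.1 ≠ [] ∧ s ∈ cat.1 then some idx else pvPass1 s rest

-- inner 'for lo, hi in cat.get("naf_ranges", [])' loop; none = fell through / break to next category
def pvInner (s : List Char) (d : Int) (idx : Int) (excludes : List (List Char)) : List (Int × Int) → Option Int
  | [] => none
  | (lo, hi) :: rest =>
    if lo ≤ d ∧ d ≤ hi then
      if excludes.any (fun suf => PySem.Chars.endswith s suf) then none else some idx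
    else pvInner s d idx excludes rest

-- pass 2: outer 'for idx, cat in enumerate(...)'
def pvPass2 (s : List Char) (d : Int) : List (Int × (List (List Char) × List (Int × Int) × List (List Char))) → Option Int
  | [] => none
  | (idx, cat) :: rest =>
    match pvInner s d idx cat.2.2 cat.2.1 with
    | some r => some r
    | none => pvPass2 s d rest

def category_index_py (naf_code : String) : Int :=
  let naf_clean := PySem.Chars.strip naf_code.toList
  let naf_div := pvNafDivision naf_clean
  match pvPass1 naf_clean (PySem.List.enumerate pvCats 0) with
  | some i => i
  | none =>
    match naf_div with
    | none => 12
    | some d =>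
      match pvPass2 naf_clean d (PySem.List.enumerate pvCats 0) with
      | some i => i
      | none => 12

-- ===== PORT B =====
def pvExactIdx : PySem.Dict (List Char) Int :=
  PySem.Dict.ofList
    [ ("85.51Z".toList, 4), ("85.52Z".toList, 4), ("85.53Z".toList, 4),
      ("85.59A".toList, 4), ("85.59B".toList, 4), ("85.60Z".toList, 4) ]

def pvDivIdx : PySem.Dict Int Int :=
  PySem.Dict.ofList
    [ ((45 : Int), (0 : Int)), ((46 : Int), (0 : Int)), ((47 : Int), (0 : Int)), ((55 : Int), (1 : Int)), ((56 : Int), (1 : Int)), ((86 : Int), (2 : Int)),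
      ((87 : Int), (2 : Int)), ((88 : Int), (2 : Int)), ((85 : Int), (3 : Int)), ((84 : Int), (5 : Int)), ((90 : Int), (6 : Int)), ((91 : Int), (6 : Int)),
      ((92 : Int), (6 : Int)), ((93 : Int), (6 : Int)), ((94 : Int), (7 : Int)), ((95 : Int), (7 : Int)), ((96 : Int), (7 : Int)), ((58 : Int), (8 : Int)),
      ((59 : Int), (8 : Int)), ((60 : Int), (8 : Int)), ((61 : Int), (8 : Int)), ((62 : Int), (8 : Int)), ((63 : Int), (8 : Int)), ((64 : Int), (8 : Int)),
      ((65 : Int), (8 : Int)), ((66 : Int), (8 : Int)), ((68 : Int), (8 : Int)), ((69 : Int), (8 : Int)), ((70 : Int), (8 : Int)), ((71 : Int), (8 : Int)),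
      ((72 : Int), (8 : Int)), ((73 : Int), (8 : Int)), ((74 : Int), (8 : Int)), ((75 : Int), (8 : Int)), ((77 : Int), (8 : Int)), ((78 : Int), (8 : Int)),
      ((79 : Int), (8 : Int)), ((80 : Int), (8 : Int)), ((81 : Int), (8 : Int)), ((82 : Int), (8 : Int)), ((5 : Int), (9 : Int)), ((6 : Int), (9 : Int)),
      ((7 : Int), (9 : Int)), ((8 : Int), (9 : Int)), ((9 : Int), (9 : Int)), ((10 : Int), (9 : Int)), ((11 : Int), (9 : Int)), ((12 : Int), (9 : Int)),
      ((13 : Int), (9 : Int)), ((14 : Int), (9 : Int)), ((15 : Int), (9 : Int)), ((16 : Int), (9 : Int)), ((17 : Int), (9 : Int)), ((18 : Int), (9 : Int)),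
      ((19 : Int), (9 : Int)), ((20 : Int), (9 : Int)), ((21 : Int), (9 : Int)), ((22 : Int), (9 : Int)), ((23 : Int), (9 : Int)), ((24 : Int), (9 : Int)),
      ((25 : Int), (9 : Int)), ((26 : Int), (9 : Int)), ((27 : Int), (9 : Int)), ((28 : Int), (9 : Int)), ((29 : Int), (9 : Int)), ((30 : Int), (9 : Int)),
      ((31 : Int), (9 : Int)), ((32 : Int), (9 : Int)), ((33 : Int), (9 : Int)), ((34 : Int), (9 : Int)), ((35 : Int), (9 : Int)), ((36 : Int), (9 : Int)),
      ((37 : Int), (9 : Int)), ((38 : Int), (9 : Int)), ((39 : Int), (9 : Int)), ((40 : Int), (9 : Int)), ((41 : Int), (9 : Int)), ((42 : Int), (9 : Int)),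
      ((43 : Int), (9 : Int)), ((49 : Int), (10 : Int)), ((50 : Int), (10 : Int)), ((51 : Int), (10 : Int)), ((52 : Int), (10 : Int)), ((53 : Int), (10 : Int)),
      ((1 : Int), (11 : Int)), ((2 : Int), (11 : Int)), ((3 : Int), (11 : Int)) ]

def pvExclSuffixes : PySem.Dict Int (List (List Char)) :=
  PySem.Dict.ofList
    [ ((85 : Int), ["51Z".toList, "52Z".toList, "53Z".toList, "59A".toList, "59B".toList, "60Z".toList]) ]

def category_index_py_alt (naf_code : String) : Int :=
  let naf_clean := PySem.Chars.strip naf_code.toList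
  match pvExactIdx.get? naf_clean with
  | some hit => hit
  | none =>
    if naf_clean.length < 2 then 12
    else
      match PySem.Int.ofChars? (PySem.Chars.slice naf_clean none (some 2)) with
      | none => 12
      | some div =>
        if (pvExclSuffixes.getD div []).any (fun suf => PySem.Chars.endswith naf_clean suf) then 12
        else pvDivIdx.getD div 12

-- ===== PRECONDITION & SPEC =====
def Spec_category_index_py (naf_code : String) (out : Int) : Prop := out = category_index_py_alt naf_code
instance (naf_code : String) (out : Int) : Decidable (Spec_category_index_py naf_code out) := by unfold Spec_category_index_py; infer_instance

-- ===== CLAIM (what is proved, stated in full; the proofs are below) =====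
def Claim_equal_category_index_py : Prop := ∀ (naf_code : String), Dom_category_index_py naf_code → Spec_category_index_py naf_code (category_index_py naf_code)

-- ===== LEMMAS AND PROOFS =====

-- A's pass 1 over the category table computes exactly B's exact-code dict lookup
theorem pv_L1 (s : List Char) :
    pvPass1 s (PySem.List.enumerate pvCats 0) = pvExactIdx.get? s := by
  by_cases h1 : s = (['8', '5', '.', '5', '1', 'Z'] : List Char)
  · subst h1; decide
  by_cases h2 : s = (['8', '5', '.', '5', '2', 'Z'] : List Char)
  · subst h2; decide
  by_cases h3 : s = (['8', '5', '.', '5', '3', 'Z'] : List Char)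
  · subst h3; decide
  by_cases h4 : s = (['8', '5', '.', '5', '9', 'A'] : List Char)
  · subst h4; decide
  by_cases h5 : s = (['8', '5', '.', '5', '9', 'B'] : List Char)
  · subst h5; decide
  by_cases h6 : s = (['8', '5', '.', '6', '0', 'Z'] : List Char)
  · subst h6; decide
  have h : pvExactIdx = PySem.Dict.mk
      [ ("85.51Z".toList, 4), ("85.52Z".toList, 4), ("85.53Z".toList, 4),
        ("85.59A".toList, 4), ("85.59B".toList, 4), ("85.60Z".toList, 4) ] := by rfl
  rw [h]
  simp only [pvCats, PySem.List.enumerate_cons, PySem.List.enumerate_nil, pvPass1,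
    PySem.Dict.get?_mk_cons, List.mem_cons, List.not_mem_nil, beq_iff_eq]
  have k1 : ¬((['8', '5', '.', '5', '1', 'Z'] : List Char) = s) := fun e => h1 e.symm
  have k2 : ¬((['8', '5', '.', '5', '2', 'Z'] : List Char) = s) := fun e => h2 e.symm
  have k3 : ¬((['8', '5', '.', '5', '3', 'Z'] : List Char) = s) := fun e => h3 e.symm
  have k4 : ¬((['8', '5', '.', '5', '9', 'A'] : List Char) = s) := fun e => h4 e.symm
  have k5 : ¬((['8', '5', '.', '5', '9', 'B'] : List Char) = s) := fun e => h5 e.symm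
  have k6 : ¬((['8', '5', '.', '6', '0', 'Z'] : List Char) = s) := fun e => h6 e.symm
  simp [h1, h2, h3, h4, h5, h6, k1, k2, k3, k4, k5, k6, PySem.Dict.get?]

set_option maxRecDepth 8192 in
theorem pv_divmk : pvDivIdx = PySem.Dict.mk
    [ (45, 0), (46, 0), (47, 0), (55, 1), (56, 1), (86, 2), (87, 2), (88, 2),
      (85, 3), (84, 5), (90, 6), (91, 6), (92, 6), (93, 6), (94, 7), (95, 7),
      (96, 7), (58, 8), (59, 8), (60, 8), (61, 8), (62, 8), (63, 8), (64, 8),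
      (65, 8), (66, 8), (68, 8), (69, 8), (70, 8), (71, 8), (72, 8), (73, 8),
      (74, 8), (75, 8), (77, 8), (78, 8), (79, 8), (80, 8), (81, 8), (82, 8),
      (5, 9), (6, 9), (7, 9), (8, 9), (9, 9), (10, 9), (11, 9), (12, 9),
      (13, 9), (14, 9), (15, 9), (16, 9), (17, 9), (18, 9), (19, 9), (20, 9),
      (21, 9), (22, 9), (23, 9), (24, 9), (25, 9), (26, 9), (27, 9), (28, 9),
      (29, 9), (30, 9), (31, 9), (32, 9), (33, 9), (34, 9), (35, 9), (36, 9),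
      (37, 9), (38, 9), (39, 9), (40, 9), (41, 9), (42, 9), (43, 9), (49, 10),
      (50, 10), (51, 10), (52, 10), (53, 10), (1, 11), (2, 11), (3, 11) ] := by rfl

theorem pv_gexcl (v : Int) : pvExclSuffixes.getD v [] =
    (if (85 : Int) = v then ["51Z".toList, "52Z".toList, "53Z".toList, "59A".toList, "59B".toList, "60Z".toList] else []) := by
  have h : pvExclSuffixes = PySem.Dict.mk [ ((85 : Int), ["51Z".toList, "52Z".toList, "53Z".toList, "59A".toList, "59B".toList, "60Z".toList]) ] := by rfl
  rw [h, PySem.Dict.getD_eq_get?_getD]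
  have hnil : (PySem.Dict.mk ([] : List (Int × List (List Char)))).get? v = none := rfl
  simp only [PySem.Dict.get?_mk_cons, beq_iff_eq, hnil,
    apply_ite (fun o : Option (List (List Char)) => o.getD []), Option.getD_some, Option.getD_none]

theorem pv_pass2_cons (s : List Char) (v idx : Int)
    (cat : List (List Char) × List (Int × Int) × List (List Char))
    (rest : List (Int × (List (List Char) × List (Int × Int) × List (List Char)))) :
    pvPass2 s v ((idx, cat) :: rest) =
      Option.or (pvInner s v idx cat.2.2 cat.2.1) (pvPass2 s v rest) := by
  cases h : pvInner s v idx cat.2.2 cat.2.1 <;> simp [pvPass2, h, Option.or]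

theorem pv_inner_cons (s : List Char) (v idx lo hi : Int) (e : List (List Char))
    (rest : List (Int × Int)) :
    pvInner s v idx e ((lo, hi) :: rest) =
      if lo ≤ v ∧ v ≤ hi then
        (if e.any (fun suf => PySem.Chars.endswith s suf) then none else some idx)
      else pvInner s v idx e rest := rfl

theorem pv_inner_nil (s : List Char) (v idx : Int) (e : List (List Char)) :
    pvInner s v idx e [] = none := rfl

theorem pv_pass2_nil (s : List Char) (v : Int) : pvPass2 s v [] = none := rfl

-- no range of the table reaches a division outside [1, 96]
theorem pv_inner_out (s : List Char) (v idx : Int) (e : List (List Char)) (R : List (Int × Int))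
    (hv : v < 1 ∨ 96 < v)
    (h : R.all (fun r => decide (1 ≤ r.1) && decide (r.2 ≤ 96)) = true) :
    pvInner s v idx e R = none := by
  induction R with
  | nil => rfl
  | cons r rest ih =>
    obtain ⟨lo, hi⟩ := r
    simp only [List.all_cons, Bool.and_eq_true, decide_eq_true_eq] at h
    rw [pv_inner_cons, if_neg (by omega)]
    exact ih (by simpa using h.2)

theorem pv_pass2_none (s : List Char) (v : Int)
    (l : List (Int × (List (List Char) × List (Int × Int) × List (List Char))))
    (hv : v < 1 ∨ 96 < v)
    (h : l.all (fun p => p.2.2.1.all fun r => decide (1 ≤ r.1) && decide (r.2 ≤ 96)) = true) :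
    pvPass2 s v l = none := by
  induction l with
  | nil => rfl
  | cons p rest ih =>
    obtain ⟨idx, cat⟩ := p
    simp only [List.all_cons, Bool.and_eq_true] at h
    rw [pv_pass2_cons, pv_inner_out s v idx cat.2.2 cat.2.1 hv h.1, Option.none_or]
    exact ih h.2

theorem pv_div_out (v : Int) (hv : v < 1 ∨ 96 < v) : pvDivIdx.getD v 12 = 12 := by
  have hn : pvDivIdx.get? v = none := by
    rw [pv_divmk]
    rw [PySem.Dict.get?_eq_none_iff_not_mem_keys]
    simp [PySem.Dict.keys_mk]
    omega
  rw [PySem.Dict.getD_eq_get?_getD, hn]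
  rfl

-- the division-85 case: the exclude suffixes decide between Éducation and the catch-all
set_option maxRecDepth 8192 in
theorem pv_case85 (s : List Char) :
    (match pvPass2 s 85 (PySem.List.enumerate pvCats 0) with | some i => i | none => (12 : Int)) =
      (if (pvExclSuffixes.getD 85 []).any (fun suf => PySem.Chars.endswith s suf) then (12 : Int)
       else pvDivIdx.getD 85 12) := by
  rw [show pvExclSuffixes.getD 85 [] = (["51Z".toList, "52Z".toList, "53Z".toList, "59A".toList,
        "59B".toList, "60Z".toList] : List (List Char)) from rfl,
      show pvDivIdx.getD 85 12 = 3 from rfl]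
  simp only [pvCats, PySem.List.enumerate_cons, PySem.List.enumerate_nil, pv_pass2_cons,
    pv_inner_cons]
  simp [pv_inner_nil, pv_pass2_nil]
  split_ifs <;> rfl

-- A's pass 2 (division ranges with exclude-suffixes) computes B's two dict lookups
set_option maxHeartbeats 4000000 in
set_option maxRecDepth 8192 in
theorem pv_L2 (s : List Char) (v : Int) :
    (match pvPass2 s v (PySem.List.enumerate pvCats 0) with | some i => i | none => (12 : Int)) =
      (if (pvExclSuffixes.getD v []).any (fun suf => PySem.Chars.endswith s suf) then (12 : Int)
       else pvDivIdx.getD v 12) := by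
  by_cases hv : 1 ≤ v ∧ v ≤ 96
  · obtain ⟨ha, hb⟩ := hv
    interval_cases v <;> first | rfl | exact pv_case85 s
  · have hv' : v < 1 ∨ 96 < v := by omega
    have h2 : pvPass2 s v (PySem.List.enumerate pvCats 0) = none :=
      pv_pass2_none s v _ hv' (by decide)
    rw [h2, pv_gexcl, if_neg (show ¬((85 : Int) = v) by omega)]
    simp only [List.any_nil, Bool.false_eq_true, if_false]
    exact (pv_div_out v hv').symm

-- ===== VERDICT (by name: the statement is the Claim_ definition above) =====
theorem category_index_py_spec : Claim_equal_category_index_py := by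
  intro naf_code _
  unfold Spec_category_index_py category_index_py category_index_py_alt
  dsimp only
  rw [pv_L1]
  cases hx : (pvExactIdx.get? (PySem.Chars.strip naf_code.toList)) with
  | some i => rfl
  | none =>
    by_cases hl : (PySem.Chars.strip naf_code.toList).length < 2
    · have : pvNafDivision (PySem.Chars.strip naf_code.toList) = none := by
        unfold pvNafDivision; rw [if_pos (Or.inr hl)]
      rw [this, if_pos hl]
    · have : pvNafDivision (PySem.Chars.strip naf_code.toList) =
        PySem.Int.ofChars? (PySem.Chars.slice (PySem.Chars.strip naf_code.toList) none (some 2)) := by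
        unfold pvNafDivision
        rw [if_neg (fun hor => hor.elim (fun h => hl (by rw [h]; simp)) (fun h => hl h))]
      rw [this, if_neg hl]
      cases PySem.Int.ofChars? (PySem.Chars.slice (PySem.Chars.strip naf_code.toList) none (some 2)) with
      | none => rfl
      | some v => exact pv_L2 _ v
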